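-- pv_equiv track=rewrite | github.com/dleticija/Project | experiments.py | full_shift_table
-- ===== SOURCE A (Python) =====
-- def match_length(S, idx1, idx2):
--     '''
--     Returns the length of the match of the substrings
--     of S beginning at idx1 and idx2.
--     '''
--     if idx1 == idx2: return len(S) - idx1
--     match_count = 0
--     while idx1 < len(S) and idx2 < len(S) and S[idx1] == S[idx2]:
--         match_count += 1
--         idx1 += 1
--         idx2 += 1
--     return match_count
--
-- def fundamental_preprocess(S):
--     '''
--     Returns Z, the Fundamental Preprocessing of S. Z[i] is the length of
--     the substring beginning at i which is also a prefix of S.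
--     This pre-processing is done in O(n) time, where n is the length of S.
--     '''
--
--     if len(S) == 0: # Handles case of empty string
--         return []
--     if len(S) == 1: # Handles case of single-character string
--         return [1]
--     z = [0 for x in S]
--     z[0] = len(S)
--     z[1] = match_length(S, 0, 1)
--
--     # Optimization from exercise 1-5
--     for i in range(2, 1 + z[1]): z[i] = z[1] - i + 1
--
--     l, r = 0, 0 # lower and upper limits of z-box
--     for i in range(2 + z[1], len(S)):
--         if i <= r: # i falls within existing z-box
--             k = i - l
--             b = z[k]
--             a = r - i + 1
--             if b < a: # b ends within existing z-box
--                 z[i] = b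
--
--             # b ends at or after the end of the z-box,
--             # we need to do an explicit match to the right of the z-box
--             else:
--                 z[i] = a + match_length(S, a, r + 1)
--                 l = i
--                 r = i + z[i] - 1
--         else: # i does not reside within existing z-box
--             z[i] = match_length(S, 0, i)
--             if z[i] > 0:
--                 l = i
--                 r = i + z[i] - 1
--     return z
--
-- def full_shift_table(S):
--     """
--     Generates F for S, an array used in a special case of the good suffix rule
--     in the Boyer-Moore string search algorithm. F[i] is the length of the
--     longest suffix of S[i:] that is also a prefix of S. In the cases it is
--     used, the shift magnitude of the pattern P relative to the text T is
--     len(P) - F[i] for a mismatch occurring at i-1.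
--     """
--     F = [0 for c in S]
--     Z = fundamental_preprocess(S)
--     longest = 0
--     for i, zv in enumerate(reversed(Z)):
--         longest = max(zv, longest) if zv == i+1 else longest
--         F[-i-1] = longest
--     return F
-- ===== SOURCE B (Python) =====
-- def full_shift_table(S):
--     """
--     Generates F for S: F[i] is the length of the longest suffix of S[i:]
--     that is also a prefix of S, computed directly from that definition.
--     """
--     n = len(S)
--     F = []
--     for i in range(n):
--         f = 0
--         for l in range(n - i, 0, -1):
--             if S[n-l:] == S[:l]:
--                 f = l
--                 break
--         F.append(f)
--     return F
-- ===== Notes on version B (the rewrite author's own statement) =====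
-- stated objective: simpler
-- what changed: Replaced the Z-algorithm (z-box preprocessing plus a reverse accumulation pass) by a direct computation of the definition: for each i, scan candidate lengths l = n-i..1 and take the first l whose length-l suffix of S equals its length-l prefix.
import Mathlib
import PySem

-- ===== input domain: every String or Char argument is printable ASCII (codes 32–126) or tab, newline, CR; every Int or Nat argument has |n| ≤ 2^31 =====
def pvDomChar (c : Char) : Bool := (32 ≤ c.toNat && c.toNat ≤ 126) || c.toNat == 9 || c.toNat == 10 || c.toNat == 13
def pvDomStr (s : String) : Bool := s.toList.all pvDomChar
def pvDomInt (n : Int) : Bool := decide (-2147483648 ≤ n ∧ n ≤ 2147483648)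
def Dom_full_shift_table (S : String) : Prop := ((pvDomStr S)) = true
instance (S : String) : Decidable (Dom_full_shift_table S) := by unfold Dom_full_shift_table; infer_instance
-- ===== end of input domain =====

-- B replaces A's Z-algorithm by the direct definition of the table (simpler, not faster).

-- ===== PORT A =====
-- while loop of match_length; exact for indices ≥ 0 (all of A's calls): an index < -len(S),
-- where Python would raise IndexError, cannot occur here.
def matchLoop (L : List Char) (i1 i2 cnt : Int) : Int :=
  if h : i1 < PySem.List.len L ∧ i2 < PySem.List.len L ∧
         (PySem.List.pyGet? L i1).isSome = true ∧ PySem.List.pyGet? L i1 = PySem.List.pyGet? L i2 then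
    matchLoop L (i1 + 1) (i2 + 1) (cnt + 1)
  else cnt
termination_by (PySem.List.len L - i2).toNat
decreasing_by simp only [PySem.List.len_eq] at *; omega

def matchLength (L : List Char) (idx1 idx2 : Int) : Int :=
  if idx1 = idx2 then PySem.List.len L - idx1
  else matchLoop L idx1 idx2 0

def fundamentalPreprocess (L : List Char) : List Int :=
  if L.length = 0 then []
  else if L.length = 1 then [1]
  else
    let n : Int := PySem.List.len L
    let z : List Int := L.map (fun _ => 0)
    let z := PySem.List.pySetD z 0 n
    let z := PySem.List.pySetD z 1 (matchLength L 0 1)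
    let z := (PySem.List.pyRange 2 (1 + PySem.List.pyGetD z 1 0) 1).foldl
               (fun z i => PySem.List.pySetD z i (PySem.List.pyGetD z 1 0 - i + 1)) z
    let res := (PySem.List.pyRange (2 + PySem.List.pyGetD z 1 0) n 1).foldl
      (fun (st : List Int × Int × Int) i =>
        let z := st.1
        let l := st.2.1
        let r := st.2.2
        if i ≤ r then
          let k := i - l
          let b := PySem.List.pyGetD z k 0
          let a := r - i + 1
          if b < a then (PySem.List.pySetD z i b, l, r)
          else
            let zi := a + matchLength L a (r + 1)
            (PySem.List.pySetD z i zi, i, i + zi - 1)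
        else
          let zi := matchLength L 0 i
          let z' := PySem.List.pySetD z i zi
          if zi > 0 then (z', i, i + zi - 1) else (z', l, r))
      (z, (0 : Int), (0 : Int))
    res.1

def full_shift_table (S : String) : List Int :=
  let L := S.toList
  let F : List Int := L.map (fun _ => 0)
  let Z := fundamentalPreprocess L
  let res := (PySem.List.enumerate Z.reverse 0).foldl
    (fun (st : List Int × Int) p =>
      let F := st.1
      let longest := st.2
      let i := p.1
      let zv := p.2
      let longest := if zv = i + 1 then max zv longest else longest
      (PySem.List.pySetD F (-i - 1) longest, longest))
    (F, 0)
  res.1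

-- ===== PORT B =====
-- inner loop of B: scan l = m, m-1, …, 1; first l with S[n-l:] == S[:l] (slices written as
-- drop/take, exact here since 0 ≤ n-l and 0 ≤ l ≤ n), else 0.
def borderScan (L : List Char) (m : Nat) : Int :=
  match m with
  | 0 => 0
  | Nat.succ m' =>
    if L.drop (L.length - (m' + 1)) = L.take (m' + 1) then ((m' + 1 : Nat) : Int)
    else borderScan L m'

def full_shift_table_alt (S : String) : List Int :=
  let L := S.toList
  let n := L.length
  (List.range n).map (fun i => borderScan L (n - i))

-- ===== PRECONDITION & SPEC =====
def Spec_full_shift_table (S : String) (out : List Int) : Prop := out = full_shift_table_alt S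
instance (S : String) (out : List Int) : Decidable (Spec_full_shift_table S out) := by unfold Spec_full_shift_table; infer_instance

-- ===== CLAIM (what is proved, stated in full; the proofs are below) =====
def Claim_equal_full_shift_table : Prop := ∀ (S : String), Dom_full_shift_table S → Spec_full_shift_table S (full_shift_table S)

-- ===== LEMMAS AND PROOFS =====

def lcpLen : List Char → List Char → Nat
  | a :: x, b :: y => if a = b then lcpLen x y + 1 else 0
  | _, _ => 0

lemma lcp_le_left (x y : List Char) : lcpLen x y ≤ x.length := by
  induction x generalizing y with
  | nil => simp [lcpLen]
  | cons a x ih =>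
    cases y with
    | nil => simp [lcpLen]
    | cons b y =>
      simp only [lcpLen]; split
      · simpa using ih y
      · simp

lemma lcp_le_right (x y : List Char) : lcpLen x y ≤ y.length := by
  induction x generalizing y with
  | nil => simp [lcpLen]
  | cons a x ih =>
    cases y with
    | nil => simp [lcpLen]
    | cons b y => simp only [lcpLen]; split <;> simp [Nat.succ_le_succ (ih y)]

lemma lcp_refl (x : List Char) : lcpLen x x = x.length := by
  induction x with
  | nil => simp [lcpLen]
  | cons a x ih => simp [lcpLen, ih]

lemma lcp_take (x y : List Char) : x.take (lcpLen x y) = y.take (lcpLen x y) := by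
  induction x generalizing y with
  | nil => simp [lcpLen]
  | cons a x ih =>
    cases y with
    | nil => simp [lcpLen]
    | cons b y =>
      simp only [lcpLen]; split
      · next h => simp [List.take_succ_cons, h, ih y]
      · simp

lemma lcp_take_of_le {x y : List Char} {a : Nat} (h : a ≤ lcpLen x y) :
    x.take a = y.take a := by
  have := lcp_take x y
  have hx := List.take_take (i := a) (j := lcpLen x y) (l := x)
  have hy := List.take_take (i := a) (j := lcpLen x y) (l := y)
  rw [Nat.min_eq_left h] at hx hy
  rw [← hx, ← hy, this]

lemma lcp_mismatch {x y : List Char} (h1 : lcpLen x y < x.length) (h2 : lcpLen x y < y.length) :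
    x[lcpLen x y]? ≠ y[lcpLen x y]? := by
  induction x generalizing y with
  | nil => simp at h1
  | cons a x ih =>
    cases y with
    | nil => simp at h2
    | cons b y =>
      by_cases h : a = b
      · have he : lcpLen (a :: x) (b :: y) = lcpLen x y + 1 := by simp [lcpLen, h]
        rw [he] at h1 h2 ⊢
        simp only [List.length_cons, Nat.add_lt_add_iff_right] at h1 h2
        simpa using ih h1 h2
      · have he : lcpLen (a :: x) (b :: y) = 0 := by simp [lcpLen, h]
        rw [he]
        simpa using h

lemma lcp_ge {x y : List Char} {a : Nat} (ha1 : a ≤ x.length) (ha2 : a ≤ y.length)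
    (h : x.take a = y.take a) : a ≤ lcpLen x y := by
  induction x generalizing y a with
  | nil => simp at ha1; omega
  | cons c x ih =>
    cases y with
    | nil => simp at ha2; omega
    | cons d y =>
      cases a with
      | zero => omega
      | succ a =>
        simp only [List.take_succ_cons, List.cons.injEq] at h
        simp only [lcpLen, if_pos h.1]
        have := ih (a := a) (by simpa using ha1) (by simpa using ha2) h.2
        omega

lemma lcp_eq_of {x y : List Char} {m : Nat} (hm1 : m ≤ x.length) (hm2 : m ≤ y.length)
    (ht : x.take m = y.take m)
    (hend : m = x.length ∨ m = y.length ∨ x[m]? ≠ y[m]?) : lcpLen x y = m := by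
  have hge := lcp_ge hm1 hm2 ht
  rcases Nat.lt_or_ge m (lcpLen x y) with hlt | hle
  · exfalso
    rcases hend with h | h | h
    · have := lcp_le_left x y; omega
    · have := lcp_le_right x y; omega
    · apply h
      have hx : m < x.length := lt_of_lt_of_le hlt (lcp_le_left x y)
      have hy : m < y.length := lt_of_lt_of_le hlt (lcp_le_right x y)
      have heq := lcp_take_of_le (x := x) (y := y) (a := m + 1) hlt
      rw [List.getElem?_eq_getElem hx, List.getElem?_eq_getElem hy]
      have h2 : (x.take (m+1))[m]? = (y.take (m+1))[m]? := by rw [heq]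
      simpa [List.getElem?_take, hx, hy, List.getElem?_eq_getElem] using h2
  · omega

lemma lcp_add {x y : List Char} {a : Nat} (ha1 : a ≤ x.length) (ha2 : a ≤ y.length)
    (h : x.take a = y.take a) :
    lcpLen x y = a + lcpLen (x.drop a) (y.drop a) := by
  induction x generalizing y a with
  | nil => simp at ha1; subst ha1; simp
  | cons c x ih =>
    cases y with
    | nil => simp at ha2; subst ha2; simp
    | cons d y =>
      cases a with
      | zero => simp
      | succ a =>
        simp only [List.take_succ_cons, List.cons.injEq] at h
        simp only [lcpLen, if_pos h.1, List.drop_succ_cons]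
        have := ih (a := a) (by simpa using ha1) (by simpa using ha2) h.2
        omega

lemma lcp_congr_right {x y z : List Char} {a : Nat} (h : y.take a = z.take a)
    (hlt : lcpLen x z < a) : lcpLen x y = lcpLen x z := by
  induction x generalizing y z a with
  | nil => simp [lcpLen]
  | cons c x ih =>
    cases z with
    | nil =>
      cases y with
      | nil => rfl
      | cons d y =>
        exfalso
        have : a = 0 := by
          by_contra hne
          cases a with
          | zero => exact hne rfl
          | succ a => simp at h
        omega
    | cons e z =>
      cases y with
      | nil =>
        cases a with
        | zero => omega
        | succ a => simp at h
      | cons d y =>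
        cases a with
        | zero => omega
        | succ a =>
          simp only [List.take_succ_cons, List.cons.injEq] at h
          simp only [lcpLen] at hlt ⊢
          rw [h.1]
          split
          · next he =>
            rw [if_pos he] at hlt
            rw [ih h.2 (by omega)]
          · rfl

def zspec (L : List Char) (j : Nat) : Nat := lcpLen L (L.drop j)

lemma zspec_le (L : List Char) (j : Nat) : zspec L j ≤ L.length - j := by
  have := lcp_le_right L (L.drop j)
  simpa [zspec] using this

lemma border_iff (L : List Char) (l : Nat) (h1 : 1 ≤ l) (h2 : l ≤ L.length) :
    (L.drop (L.length - l) = L.take l) ↔ zspec L (L.length - l) = l := by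
  have hlen : (L.drop (L.length - l)).length = l := by simp; omega
  constructor
  · intro h
    apply le_antisymm
    · have := lcp_le_right L (L.drop (L.length - l)); rw [hlen] at this; exact this
    · apply lcp_ge h2 (by omega)
      rw [h]
      simp [List.take_take]
  · intro h
    have ht := lcp_take_of_le (x := L) (y := L.drop (L.length - l)) (a := l) (le_of_eq h.symm)
    rw [← ht.symm]
    exact (List.take_of_length_le (by omega)).symm

lemma matchLoop_spec (L : List Char) (i1 i2 cnt : Int) (h1 : 0 ≤ i1) (h2 : 0 ≤ i2) :
    matchLoop L i1 i2 cnt = cnt + lcpLen (L.drop i1.toNat) (L.drop i2.toNat) := by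
  rw [matchLoop]
  split
  · next h =>
    obtain ⟨ha, hb, hc, hd⟩ := h
    simp only [PySem.List.len_eq] at ha hb
    have hi1 : i1.toNat < L.length := by omega
    have hi2 : i2.toNat < L.length := by omega
    rw [PySem.List.pyGet?_of_nonneg L h1, PySem.List.pyGet?_of_nonneg L h2] at hd
    rw [List.getElem?_eq_getElem hi1, List.getElem?_eq_getElem hi2] at hd
    have hchar : L[i1.toNat] = L[i2.toNat] := by simpa using hd
    have ih := matchLoop_spec L (i1 + 1) (i2 + 1) (cnt + 1) (by omega) (by omega)
    rw [ih]
    have n1 : (i1 + 1).toNat = i1.toNat + 1 := by omega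
    have n2 : (i2 + 1).toNat = i2.toNat + 1 := by omega
    have e1 : L.drop i1.toNat = L[i1.toNat] :: L.drop ((i1 + 1).toNat) := by
      rw [n1, List.drop_eq_getElem_cons hi1]
    have e2 : L.drop i2.toNat = L[i2.toNat] :: L.drop ((i2 + 1).toNat) := by
      rw [n2, List.drop_eq_getElem_cons hi2]
    rw [e1, e2]
    simp only [lcpLen, if_pos hchar]
    push_cast
    ring
  · next h =>
    have hz : lcpLen (L.drop i1.toNat) (L.drop i2.toNat) = 0 := by
      by_cases c1 : L.length ≤ i1.toNat
      · have : L.drop i1.toNat = [] := by rw [List.drop_eq_nil_iff]; omega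
        rw [this]; rfl
      · by_cases c2 : L.length ≤ i2.toNat
        · have : L.drop i2.toNat = [] := by rw [List.drop_eq_nil_iff]; omega
          rw [this]; cases L.drop i1.toNat <;> rfl
        · push Not at c1 c2
          have hg1 : PySem.List.pyGet? L i1 = some L[i1.toNat] := by
            rw [PySem.List.pyGet?_of_nonneg L h1, List.getElem?_eq_getElem c1]
          have hg2 : PySem.List.pyGet? L i2 = some L[i2.toNat] := by
            rw [PySem.List.pyGet?_of_nonneg L h2, List.getElem?_eq_getElem c2]
          have hne : L[i1.toNat] ≠ L[i2.toNat] := by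
            intro hEq
            exact h ⟨by simp; omega, by simp; omega, by simp [hg1], by rw [hg1, hg2, hEq]⟩
          rw [List.drop_eq_getElem_cons c1, List.drop_eq_getElem_cons c2]
          simp [lcpLen, hne]
    omega
termination_by (PySem.List.len L - i2).toNat
decreasing_by simp only [PySem.List.len_eq] at *; omega

lemma matchLength_ne (L : List Char) (i1 i2 : Int) (h : i1 ≠ i2) (h1 : 0 ≤ i1) (h2 : 0 ≤ i2) :
    matchLength L i1 i2 = lcpLen (L.drop i1.toNat) (L.drop i2.toNat) := by
  rw [matchLength, if_neg h, matchLoop_spec L i1 i2 0 h1 h2]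
  simp

lemma zchars (L : List Char) (t : Nat) (ht : t ≤ zspec L 1) : L[t]? = L[0]? := by
  induction t with
  | zero => rfl
  | succ t ih =>
    have hstep : L[t]? = L[t + 1]? := by
      have h1 := lcp_take_of_le (x := L) (y := L.drop 1) (a := zspec L 1) le_rfl
      have h2 : (L.take (zspec L 1))[t]? = ((L.drop 1).take (zspec L 1))[t]? := by rw [h1]
      rw [List.getElem?_take, List.getElem?_take, List.getElem?_drop] at h2
      simpa [if_pos (by omega : t < zspec L 1), Nat.add_comm] using h2
    rw [← hstep, ih (by omega)]

lemma zmismatch (L : List Char) (h : zspec L 1 + 1 < L.length) :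
    L[zspec L 1]? ≠ L[zspec L 1 + 1]? := by
  have hle := zspec_le L 1
  have := lcp_mismatch (x := L) (y := L.drop 1) (by simp [zspec] at *; omega)
    (by simp [zspec] at *; omega)
  rw [List.getElem?_drop] at this
  simpa [zspec, Nat.add_comm] using this

lemma zl3 (L : List Char) (i : Nat) (h2 : 2 ≤ i) (hi : i ≤ zspec L 1) :
    zspec L i = zspec L 1 + 1 - i := by
  set z1 := zspec L 1 with hz1
  have hle := zspec_le L 1
  have hlen : 3 ≤ L.length := by omega
  have hm2 : z1 + 1 - i ≤ (L.drop i).length := by simp; omega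
  apply lcp_eq_of (by omega) hm2
  · apply List.ext_getElem?
    intro t
    rw [List.getElem?_take, List.getElem?_take, List.getElem?_drop]
    split
    · next hlt =>
      rw [zchars L t (by omega), zchars L (i + t) (by omega)]
    · rfl
  · by_cases hend : z1 + 1 = L.length
    · right; left; simp; omega
    · right; right
      rw [List.getElem?_drop]
      have e : i + (z1 + 1 - i) = z1 + 1 := by omega
      rw [e, zchars L (z1 + 1 - i) (by omega)]
      rw [← zchars L z1 le_rfl]
      exact zmismatch L (by omega)

lemma zl4 (L : List Char) (h : zspec L 1 + 1 < L.length) (h2 : 2 ≤ L.length) :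
    zspec L (zspec L 1 + 1) = 0 := by
  apply lcp_eq_of (x := L) (y := L.drop (zspec L 1 + 1)) (Nat.zero_le _) (Nat.zero_le _) (by simp)
  right; right
  rw [List.getElem?_drop]
  rw [← zchars L (zspec L 1) le_rfl]
  simpa using zmismatch L h

lemma zbox_take (L : List Char) (l i r : Nat) (hl : zspec L l = r + 1 - l)
    (hli : l + 1 ≤ i) (hir : i ≤ r) (hr : r + 1 ≤ L.length) :
    (L.drop (i - l)).take (r + 1 - i) = (L.drop i).take (r + 1 - i) := by
  have hTL : L.take (r + 1 - l) = (L.drop l).take (r + 1 - l) := by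
    have := lcp_take_of_le (x := L) (y := L.drop l) (a := zspec L l) le_rfl
    rw [hl] at this; exact this
  have h3 := congrArg (List.drop (i - l)) hTL
  rw [List.drop_take, List.drop_take, List.drop_drop] at h3
  have e1 : r + 1 - l - (i - l) = r + 1 - i := by omega
  have e2 : l + (i - l) = i := by omega
  rw [e1, e2] at h3
  exact h3

lemma zbox_copy (L : List Char) (l i r : Nat) (hl : zspec L l = r + 1 - l)
    (hli : l + 1 ≤ i) (hir : i ≤ r) (hr : r + 1 ≤ L.length)
    (hlt : zspec L (i - l) < r + 1 - i) : zspec L i = zspec L (i - l) := by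
  have htk := zbox_take L l i r hl hli hir hr
  exact lcp_congr_right htk.symm hlt

lemma zbox_extend (L : List Char) (l i r : Nat) (hl : zspec L l = r + 1 - l)
    (hli : l + 1 ≤ i) (hir : i ≤ r) (hr : r + 1 ≤ L.length)
    (hge : r + 1 - i ≤ zspec L (i - l)) :
    zspec L i = (r + 1 - i) + lcpLen (L.drop (r + 1 - i)) (L.drop (r + 1)) := by
  have htk := zbox_take L l i r hl hli hir hr
  have h1 : L.take (r + 1 - i) = (L.drop (i - l)).take (r + 1 - i) :=
    lcp_take_of_le hge
  have h2 : L.take (r + 1 - i) = (L.drop i).take (r + 1 - i) := h1.trans htk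
  have := lcp_add (x := L) (y := L.drop i) (a := r + 1 - i) (by omega) (by simp; omega) h2
  rw [List.drop_drop] at this
  have e : i + (r + 1 - i) = r + 1 := by omega
  rw [e] at this
  exact this

def zArr (L : List Char) (i : Nat) : List Int :=
  (List.range L.length).map (fun j => if j < i then (zspec L j : Int) else 0)

lemma zArr_length (L : List Char) (i : Nat) : (zArr L i).length = L.length := by
  simp [zArr]

lemma zArr_getD (L : List Char) (i : Nat) (t : Int) (h0 : 0 ≤ t) (h1 : t < (L.length : Int)) :
    PySem.List.pyGetD (zArr L i) t 0 = if t.toNat < i then (zspec L t.toNat : Int) else 0 := by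
  rw [PySem.List.pyGetD_eq_getElem (zArr L i) 0 h0 (by rw [zArr_length]; exact_mod_cast h1)]
  simp [zArr]

lemma zArr_set (L : List Char) (i : Nat) (hi : i < L.length) :
    PySem.List.pySetD (zArr L i) (i : Int) (zspec L i : Int) = zArr L (i + 1) := by
  rw [PySem.List.pySetD_natCast]
  apply List.ext_getElem (by simp [zArr])
  intro j hj1 hj2
  simp only [zArr, List.getElem_set, List.getElem_map, List.getElem_range] at *
  simp only [List.length_map, List.length_range] at hj1
  by_cases h : i = j
  · subst h; simp
  · rw [if_neg h]
    have : j < i ↔ j < i + 1 := by omega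
    simp [this]

lemma zArr_stable (L : List Char) (i k : Nat) (h : L.length ≤ i) (h2 : L.length ≤ k) :
    zArr L i = zArr L k := by
  unfold zArr
  apply List.map_congr_left
  intro j hj
  simp at hj
  rw [if_pos (by omega), if_pos (by omega)]

lemma pyRange_foldl_inv {σ : Type} (step : σ → Int → σ) (Inv : Int → σ → Prop) (a b : Int)
    (hab : a ≤ b) (init : σ) (h0 : Inv a init)
    (hstep : ∀ i s, a ≤ i → i < b → Inv i s → Inv (i + 1) (step s i)) :
    Inv b ((PySem.List.pyRange a b 1).foldl step init) := by
  by_cases hab' : a < b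
  · rw [PySem.List.pyRange_one_cons hab']
    simp only [List.foldl_cons]
    exact pyRange_foldl_inv step Inv (a + 1) b (by omega) (step init a)
      (hstep a init le_rfl hab' h0) (fun i s hi hib => hstep i s (by omega) hib)
  · have hba : a = b := by omega
    subst hba
    rw [PySem.List.pyRange_one_eq_nil le_rfl]
    simpa using h0
termination_by (b - a).toNat
decreasing_by omega

def zstep (L : List Char) (st : List Int × Int × Int) (i : Int) : List Int × Int × Int :=
  let z := st.1
  let l := st.2.1
  let r := st.2.2
  if i ≤ r then
    let k := i - l
    let b := PySem.List.pyGetD z k 0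
    let a := r - i + 1
    if b < a then (PySem.List.pySetD z i b, l, r)
    else
      let zi := a + matchLength L a (r + 1)
      (PySem.List.pySetD z i zi, i, i + zi - 1)
  else
    let zi := matchLength L 0 i
    let z' := PySem.List.pySetD z i zi
    if zi > 0 then (z', i, i + zi - 1) else (z', l, r)

def ZInv (L : List Char) (i : Int) (s : List Int × Int × Int) : Prop :=
  s.1 = zArr L i.toNat ∧
  (s.2.2 < i ∨ (1 ≤ s.2.1 ∧ s.2.1 < i ∧ 1 ≤ zspec L s.2.1.toNat ∧
     s.2.2 = s.2.1 + (zspec L s.2.1.toNat : Int) - 1))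

lemma zstep_inv (L : List Char) (i : Int) (s : List Int × Int × Int)
    (h2i : 2 ≤ i) (hin : i < (L.length : Int)) (h : ZInv L i s) :
    ZInv L (i + 1) (zstep L s i) := by
  obtain ⟨z, l, r⟩ := s
  obtain ⟨hz, hbox⟩ := h
  simp only at hz hbox
  have hiN : i.toNat < L.length := by omega
  have hset : ∀ v : Nat, v = zspec L i.toNat →
      PySem.List.pySetD z i ((v : Nat) : Int) = zArr L (i + 1).toNat := by
    intro v hv
    subst hv
    rw [hz]
    have h1 : PySem.List.pySetD (zArr L i.toNat) i ((zspec L i.toNat : Nat) : Int)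
        = PySem.List.pySetD (zArr L i.toNat) ((i.toNat : Nat) : Int) ((zspec L i.toNat : Nat) : Int) := by
      congr 1
      omega
    rw [h1, zArr_set L i.toNat hiN]
    congr 1
    omega
  unfold zstep ZInv
  simp only
  by_cases hir : i ≤ r
  · rw [if_pos hir]
    rcases hbox with hb1 | ⟨hl1, hli, hzl1, hrr⟩
    · omega
    · have hzle := zspec_le L l.toNat
      have hrN : r.toNat = l.toNat + zspec L l.toNat - 1 := by omega
      have hrn : r.toNat + 1 ≤ L.length := by omega
      have hlspec : zspec L l.toNat = r.toNat + 1 - l.toNat := by omega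
      have hkread : PySem.List.pyGetD z (i - l) 0 = (zspec L (i - l).toNat : Int) := by
        rw [hz, zArr_getD L i.toNat (i - l) (by omega) (by omega)]
        rw [if_pos (by omega)]
      have hkN : (i - l).toNat = i.toNat - l.toNat := by omega
      rw [hkread]
      by_cases hba : (zspec L (i - l).toNat : Int) < r - i + 1
      · rw [if_pos hba]
        have hcopy := zbox_copy L l.toNat i.toNat r.toNat hlspec (by omega) (by omega) hrn
          (by rw [← hkN]; omega)
        dsimp only
        refine ⟨?_, Or.inr ⟨hl1, by omega, hzl1, hrr⟩⟩
        rw [hkN, ← hcopy] at *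
        exact hset _ rfl
      · rw [if_neg hba]
        have hext := zbox_extend L l.toNat i.toNat r.toNat hlspec (by omega) (by omega) hrn
          (by rw [← hkN]; omega)
        have hml : matchLength L (r - i + 1) (r + 1)
            = (lcpLen (L.drop (r.toNat + 1 - i.toNat)) (L.drop (r.toNat + 1)) : Int) := by
          rw [matchLength_ne L _ _ (by omega) (by omega) (by omega)]
          have e1 : (r - i + 1).toNat = r.toNat + 1 - i.toNat := by omega
          have e2 : (r + 1).toNat = r.toNat + 1 := by omega
          rw [e1, e2]
        have hzi : r - i + 1 + matchLength L (r - i + 1) (r + 1) = (zspec L i.toNat : Int) := by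
          rw [hml, hext]; push_cast; omega
        dsimp only
        refine ⟨?_, Or.inr ⟨by omega, by omega, ?_, ?_⟩⟩
        · rw [hzi]
          exact hset _ rfl
        · have h1 : (1 : Int) ≤ r - i + 1 := by omega
          have h2 : (1 : Int) ≤ (zspec L i.toNat : Int) := by
            rw [← hzi]
            have := matchLoop_spec L (r - i + 1) (r + 1) 0 (by omega) (by omega)
            omega
          omega
        · rw [hzi]
  · rw [if_neg hir]
    have hml : matchLength L 0 i = (zspec L i.toNat : Int) := by
      rw [matchLength_ne L _ _ (by omega) (by omega) (by omega)]
      simp [zspec]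
    have hznew : PySem.List.pySetD z i (matchLength L 0 i) = zArr L (i + 1).toNat := by
      rw [hml]
      exact hset _ rfl
    by_cases hpos : matchLength L 0 i > 0
    · rw [if_pos hpos]
      dsimp only
      refine ⟨hznew, Or.inr ⟨by omega, by omega, ?_, ?_⟩⟩
      · rw [hml] at hpos; omega
      · rw [hml]
    · rw [if_neg hpos]
      dsimp only
      refine ⟨hznew, ?_⟩
      rcases hbox with hb1 | ⟨hl1, hli, hzl1, hrr⟩
      · left; omega
      · right; exact ⟨hl1, by omega, hzl1, hrr⟩

lemma zArr_full (L : List Char) :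
    zArr L L.length = (List.range L.length).map (fun j => (zspec L j : Int)) := by
  unfold zArr
  apply List.map_congr_left
  intro j hj
  simp at hj
  rw [if_pos hj]

lemma zArr_succ_z1 (L : List Char) (h2 : 2 ≤ L.length) :
    zArr L (zspec L 1 + 1) = zArr L (zspec L 1 + 2) := by
  unfold zArr
  apply List.map_congr_left
  intro j hj
  simp at hj
  by_cases hlt : j < zspec L 1 + 1
  · rw [if_pos hlt, if_pos (by omega)]
  · rw [if_neg hlt]
    by_cases heq : j = zspec L 1 + 1
    · subst heq
      rw [if_pos (by omega)]
      by_cases hz0 : zspec L 1 = 0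
      · rw [hz0]
        simp [hz0]
      · rw [zl4 L (by omega) h2]
        simp
    · rw [if_neg (by omega)]

lemma zspec_zero (L : List Char) : zspec L 0 = L.length := by
  simp [zspec, lcp_refl]

lemma fundamentalPreprocess_eq (L : List Char) :
    fundamentalPreprocess L = (List.range L.length).map (fun j => (zspec L j : Int)) := by
  unfold fundamentalPreprocess
  by_cases h0 : L.length = 0
  · rw [if_pos h0, h0]; rfl
  · rw [if_neg h0]
    by_cases h1 : L.length = 1
    · rw [if_pos h1, h1]
      simp [List.range_succ, zspec_zero, h1]
    · rw [if_neg h1]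
      dsimp only
      have hn2 : 2 ≤ L.length := by omega
      set n : Nat := L.length with hn
      -- initial zero array is zArr L 0
      have hz0 : L.map (fun _ => (0 : Int)) = zArr L 0 := by
        simp [zArr, List.map_const']
      -- z after setting indices 0 and 1
      have hml01 : matchLength L 0 1 = (zspec L 1 : Int) := by
        rw [matchLength_ne L 0 1 (by omega) (by omega) (by omega)]
        simp [zspec]
      have hz2 : PySem.List.pySetD (PySem.List.pySetD (L.map (fun _ => (0:Int))) 0 (PySem.List.len L))
          1 (matchLength L 0 1) = zArr L 2 := by
        rw [hz0, hml01, PySem.List.len_eq]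
        have e0 : PySem.List.pySetD (zArr L 0) 0 (L.length : Int)
            = PySem.List.pySetD (zArr L 0) ((0 : Nat) : Int) ((zspec L 0 : Nat) : Int) := by
          rw [zspec_zero]; norm_num
        rw [e0, zArr_set L 0 (by omega)]
        have e1 : PySem.List.pySetD (zArr L 1) 1 ((zspec L 1 : Nat) : Int)
            = PySem.List.pySetD (zArr L 1) ((1 : Nat) : Int) ((zspec L 1 : Nat) : Int) := by
          norm_num
        rw [e1, zArr_set L 1 (by omega)]
      rw [hz2]
      set z1 : Nat := zspec L 1 with hz1def
      have hz1le : z1 ≤ n - 1 := by simpa using zspec_le L 1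
      have hrd2 : PySem.List.pyGetD (zArr L 2) 1 0 = (z1 : Int) := by
        rw [zArr_getD L 2 1 (by omega) (by omega)]
        norm_num
        exact hz1def.symm
      rw [hrd2]
      -- the prefill loop
      have hpre : (PySem.List.pyRange 2 (1 + (z1 : Int)) 1).foldl
          (fun z i => PySem.List.pySetD z i (PySem.List.pyGetD z 1 0 - i + 1)) (zArr L 2)
          = zArr L (z1 + 2) := by
        by_cases hz1z : z1 = 0
        · rw [hz1z, PySem.List.pyRange_one_eq_nil (by norm_num)]
          simp only [List.foldl_nil]
        · have hfold := pyRange_foldl_inv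
            (fun z i => PySem.List.pySetD z i (PySem.List.pyGetD z 1 0 - i + 1))
            (fun i z => z = zArr L i.toNat) 2 (1 + (z1 : Int)) (by omega) (zArr L 2)
            rfl
            (fun i z hi hib hz => by
              subst hz
              dsimp only
              have hiN2 : 2 ≤ i.toNat := by omega
              have hiNz : i.toNat ≤ z1 := by omega
              have hrd : PySem.List.pyGetD (zArr L i.toNat) 1 0 = (z1 : Int) := by
                rw [zArr_getD L i.toNat 1 (by omega) (by omega)]
                rw [if_pos (by omega)]
                rfl
              rw [hrd]
              have hval : (z1 : Int) - i + 1 = ((zspec L i.toNat : Nat) : Int) := by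
                rw [zl3 L i.toNat hiN2 (hz1def ▸ hiNz)]
                push_cast [← hz1def]
                omega
              rw [hval]
              have e : PySem.List.pySetD (zArr L i.toNat) i ((zspec L i.toNat : Nat) : Int)
                  = PySem.List.pySetD (zArr L i.toNat) ((i.toNat : Nat) : Int) ((zspec L i.toNat : Nat) : Int) := by
                congr 1
                omega
              rw [e, zArr_set L i.toNat (by omega)]
              congr 1
              omega)
          rw [hfold]
          have e : (1 + (z1 : Int)).toNat = z1 + 1 := by omega
          rw [e]
          exact zArr_succ_z1 L hn2
      rw [hpre]
      have hrd3 : PySem.List.pyGetD (zArr L (z1 + 2)) 1 0 = (z1 : Int) := by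
        rw [zArr_getD L (z1 + 2) 1 (by omega) (by omega)]
        rw [if_pos (by omega)]
        norm_num
        exact hz1def.symm
      rw [hrd3]
      -- the main loop
      by_cases hmain : 2 + (z1 : Int) ≤ (PySem.List.len L)
      · have hfold := pyRange_foldl_inv (zstep L) (ZInv L) (2 + (z1 : Int)) (PySem.List.len L)
          hmain (zArr L (z1 + 2), (0 : Int), (0 : Int))
          ⟨by show zArr L (z1 + 2) = zArr L (2 + (z1 : Int)).toNat; congr 1; omega,
           Or.inl (by show (0 : Int) < 2 + (z1 : Int); omega)⟩
          (fun i s hi hib hinv => zstep_inv L i s (by omega) (by simpa using hib) hinv)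
        obtain ⟨hfz, -⟩ := hfold
        have hfz' : (List.foldl (zstep L) (zArr L (z1 + 2), (0 : Int), (0 : Int))
            (PySem.List.pyRange (2 + (z1 : Int)) (PySem.List.len L) 1)).1
            = (List.range L.length).map (fun j => (zspec L j : Int)) := by
          rw [hfz]
          have e : (PySem.List.len L).toNat = L.length := by simp [PySem.List.len_eq]
          rw [e, zArr_full]
        exact hfz'
      · rw [PySem.List.pyRange_one_eq_nil (by omega)]
        simp only [List.foldl_nil]
        show zArr L (z1 + 2) = _
        rw [← zArr_full]
        exact zArr_stable L (z1 + 2) n (by simp [PySem.List.len_eq] at hmain; omega) le_rfl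

def bmax (L : List Char) : Nat → Nat
  | 0 => 0
  | Nat.succ m => if zspec L (L.length - (m + 1)) = m + 1 then m + 1 else bmax L m

lemma bmax_le (L : List Char) (m : Nat) : bmax L m ≤ m := by
  induction m with
  | zero => simp [bmax]
  | succ m ih => unfold bmax; split <;> omega

lemma borderScan_eq_bmax (L : List Char) (m : Nat) (hm : m ≤ L.length) :
    borderScan L m = (bmax L m : Int) := by
  induction m with
  | zero => rfl
  | succ m ih =>
    unfold borderScan bmax
    by_cases hb : L.drop (L.length - (m + 1)) = L.take (m + 1)
    · rw [if_pos hb, if_pos ((border_iff L (m + 1) (by omega) hm).mp hb)]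
    · rw [if_neg hb, if_neg (fun hc => hb ((border_iff L (m + 1) (by omega) hm).mpr hc)),
        ih (by omega)]

def fstep (st : List Int × Int) (p : Int × Int) : List Int × Int :=
  let F := st.1
  let longest := st.2
  let i := p.1
  let zv := p.2
  let longest := if zv = i + 1 then max zv longest else longest
  (PySem.List.pySetD F (-i - 1) longest, longest)

def fArr (L : List Char) (t : Nat) : List Int :=
  (List.range L.length).map (fun p => if L.length - t ≤ p then (bmax L (L.length - p) : Int) else 0)

lemma pySetD_neg (xs : List Int) (t : Nat) (v : Int) (h : t < xs.length) :
    PySem.List.pySetD xs (-(t : Int) - 1) v = xs.set (xs.length - 1 - t) v := by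
  simp only [PySem.List.pySetD, PySem.List.pySet?, PySem.List.pyIdx?]
  rw [if_neg (by omega), if_pos (by omega)]
  simp only [Option.map_some, Option.getD_some]
  congr 1
  omega

lemma fpass_fold (L : List Char) (t : Nat) (ht : t ≤ L.length) :
    ((PySem.List.enumerate (((List.range L.length).map (fun j => (zspec L j : Int))).reverse) 0).take t).foldl
      fstep (L.map (fun _ => (0 : Int)), 0) = (fArr L t, (bmax L t : Int)) := by
  set n := L.length with hn
  induction t with
  | zero =>
    simp only [List.take_zero, List.foldl_nil]
    have h1 : fArr L 0 = (List.range n).map (fun _ => (0 : Int)) := by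
      apply List.map_congr_left
      intro p hp
      simp at hp
      rw [if_neg (by omega)]
    rw [h1]
    simp only [bmax, List.map_const', List.length_range]
    rfl
  | succ t ih =>
    have hlen : (((List.range n).map (fun j => (zspec L j : Int))).reverse).length = n := by simp
    have helem : (PySem.List.enumerate (((List.range n).map (fun j => (zspec L j : Int))).reverse) 0)[t]?
        = some ((0 + (t : Int), (zspec L (n - 1 - t) : Int))) := by
      rw [PySem.List.getElem?_enumerate]
      rw [List.getElem?_reverse (by simp; omega)]
      simp only [List.length_map, List.length_range]
      rw [List.getElem?_map, List.getElem?_range (by omega)]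
      rfl
    rw [List.take_add_one, List.foldl_append, ih (by omega), helem]
    simp only [Option.toList_some, List.foldl_cons, List.foldl_nil]
    unfold fstep
    dsimp only
    have hbs : bmax L (t + 1) = if zspec L (n - 1 - t) = t + 1 then t + 1 else bmax L t := by
      show (if zspec L (L.length - (t + 1)) = t + 1 then t + 1 else bmax L t) = _
      rw [show L.length - (t + 1) = n - 1 - t by omega]
    have hlongest : (if ((zspec L (n - 1 - t) : Int)) = 0 + (t : Int) + 1
        then max ((zspec L (n - 1 - t) : Int)) ((bmax L t : Int)) else ((bmax L t : Int)))
        = ((bmax L (t + 1) : Int)) := by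
      have hb := bmax_le L t
      rw [hbs]
      by_cases hc : zspec L (n - 1 - t) = t + 1
      · rw [if_pos (by omega), if_pos hc, hc]
        push_cast
        omega
      · rw [if_neg (fun h => hc (by omega)), if_neg hc]
    rw [hlongest]
    have hsetlen : (fArr L t).length = n := by rw [fArr]; simp only [List.length_map, List.length_range]; rfl
    have hset : PySem.List.pySetD (fArr L t) (-(0 + (t : Int)) - 1) ((bmax L (t + 1) : Int))
        = fArr L (t + 1) := by
      rw [show -(0 + (t : Int)) - 1 = -(t : Int) - 1 by ring]
      rw [pySetD_neg (fArr L t) t _ (by rw [hsetlen]; omega)]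
      apply List.ext_getElem (by simp [fArr])
      intro p hp1 hp2
      rw [List.getElem_set]
      simp only [fArr, List.getElem_map, List.getElem_range] at *
      clear hp1 hp2
      rw [hsetlen]
      by_cases hpe : n - 1 - t = p
      · rw [if_pos hpe]
        have e2 : n - p = t + 1 := by omega
        rw [if_pos (by omega), e2]
      · rw [if_neg hpe]
        by_cases hge : n - t ≤ p
        · rw [if_pos (by omega), if_pos (by omega)]
        · rw [if_neg (by omega), if_neg (by omega)]
    rw [hset]

lemma full_shift_eq (S : String) : full_shift_table S = full_shift_table_alt S := by
  unfold full_shift_table full_shift_table_alt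
  dsimp only
  rw [fundamentalPreprocess_eq S.toList]
  have hlen : (PySem.List.enumerate (((List.range S.toList.length).map
      (fun j => (zspec S.toList j : Int))).reverse) 0).length = S.toList.length := by
    simp [PySem.List.length_enumerate]
  have h := fpass_fold S.toList S.toList.length le_rfl
  rw [List.take_of_length_le (le_of_eq hlen)] at h
  have h1 : (List.foldl fstep (S.toList.map (fun _ => (0 : Int)), 0)
      (PySem.List.enumerate (((List.range S.toList.length).map
        (fun j => (zspec S.toList j : Int))).reverse) 0)).1 = fArr S.toList S.toList.length := by
    rw [h]
  refine Eq.trans h1 ?_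
  unfold fArr
  apply List.map_congr_left
  intro p hp
  simp only [List.mem_range] at hp
  rw [if_pos (by omega), borderScan_eq_bmax S.toList (S.toList.length - p) (by omega)]

-- ===== VERDICT (by name: the statement is the Claim_ definition above) =====
theorem full_shift_table_spec : Claim_equal_full_shift_table := by
  intro S _
  unfold Spec_full_shift_table
  exact full_shift_eq S
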